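-- pv_equiv track=rewrite | github.com/NSLab-CUK/LiteralKG | dataloader3.py | generate_batch_by_neg_rate
-- ===== SOURCE A (Python) =====
-- def generate_batch_by_neg_rate(batch, rate):
--     zip_list = []
--     results = []
--
--     for i in range(rate):
--         zip_list.append(batch)
--
--     zip_list = list(zip(*zip_list))
--
--     for x in zip_list:
--         results += list(x)
--
--     return results
-- ===== SOURCE B (Python) =====
-- def generate_batch_by_neg_rate(batch, rate):
--     return [item for item in batch for _ in range(rate)]
-- ===== Notes on version B (the rewrite author's own statement) =====
-- stated objective: simpler
-- what changed: Replaced the build-rate-copies / zip-transpose / concatenate pipeline with a single nested comprehension that emits each batch element rate times directly.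
import Mathlib
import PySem

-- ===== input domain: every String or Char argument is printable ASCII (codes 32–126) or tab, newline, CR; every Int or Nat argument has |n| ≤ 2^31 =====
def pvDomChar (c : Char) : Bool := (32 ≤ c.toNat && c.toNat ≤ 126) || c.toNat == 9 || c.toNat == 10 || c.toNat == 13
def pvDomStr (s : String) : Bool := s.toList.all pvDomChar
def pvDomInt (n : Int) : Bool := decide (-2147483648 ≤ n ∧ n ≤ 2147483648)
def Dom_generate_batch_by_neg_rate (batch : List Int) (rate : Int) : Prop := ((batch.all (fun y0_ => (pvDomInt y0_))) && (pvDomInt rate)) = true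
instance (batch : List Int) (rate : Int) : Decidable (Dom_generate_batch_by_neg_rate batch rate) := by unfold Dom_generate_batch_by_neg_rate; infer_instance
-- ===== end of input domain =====

-- B replaces A's build-rate-copies / zip-transpose / concatenate pipeline with one direct
-- nested comprehension emitting each element rate times (simpler; same asymptotic cost).

-- ===== PORT A =====
-- Python's zip(*rows) on a list of rows: take heads while every row is nonempty.
def pyZip (ls : List (List Int)) : List (List Int) :=
  if _h : ls ≠ [] ∧ ∀ l ∈ ls, l ≠ [] then
    (ls.map (fun l => l.headD 0)) :: pyZip (ls.map List.tail)
  else []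
termination_by (ls.headD []).length
decreasing_by
  obtain ⟨hne, hall⟩ := _h
  match ls, hne with
  | a :: rest, _ =>
    have ha : a ≠ [] := hall a (by simp)
    simp only [List.headD_cons]
    cases a with
    | nil => exact absurd rfl ha
    | cons x xs => simp

def generate_batch_by_neg_rate (batch : List Int) (rate : Int) : List Int :=
  let zip_list := (PySem.List.pyRange 0 rate 1).foldl (fun acc _ => acc ++ [batch]) []
  let zipped := pyZip zip_list
  zipped.foldl (fun results x => results ++ x) []

-- ===== PORT B =====
-- [item for item in batch for _ in range(rate)]
def generate_batch_by_neg_rate_alt (batch : List Int) (rate : Int) : List Int :=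
  batch.flatMap (fun item => (PySem.List.pyRange 0 rate 1).map (fun _ => item))

-- ===== PRECONDITION & SPEC =====
def Spec_generate_batch_by_neg_rate (batch : List Int) (rate : Int) (out : List Int) : Prop := out = generate_batch_by_neg_rate_alt batch rate
instance (batch : List Int) (rate : Int) (out : List Int) : Decidable (Spec_generate_batch_by_neg_rate batch rate out) := by unfold Spec_generate_batch_by_neg_rate; infer_instance

-- ===== CLAIM (what is proved, stated in full; the proofs are below) =====
def Claim_equal_generate_batch_by_neg_rate : Prop := ∀ (batch : List Int) (rate : Int), Dom_generate_batch_by_neg_rate batch rate → Spec_generate_batch_by_neg_rate batch rate (generate_batch_by_neg_rate batch rate)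

-- ===== LEMMAS AND PROOFS =====

-- zip of k identical rows b is the list of k-fold repetitions of b's elements (empty when k = 0).
theorem pyZip_replicate (b : List Int) : ∀ k : Nat,
    pyZip (List.replicate k b) = if k = 0 then [] else b.map (fun a => List.replicate k a) := by
  induction b with
  | nil =>
    intro k
    cases k with
    | zero => rw [pyZip]; simp
    | succ n => rw [pyZip]; simp
  | cons a t ih =>
    intro k
    cases k with
    | zero => rw [pyZip]; simp
    | succ n =>
      rw [pyZip]
      have h1 : (List.replicate (n+1) (a :: t) ≠ [] ∧
          ∀ l ∈ List.replicate (n+1) (a :: t), l ≠ []) := by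
        constructor
        · simp
        · intro l hl; simp at hl; simp [hl]
      rw [dif_pos h1]
      have hheads : (List.replicate (n+1) (a :: t)).map (fun l => l.headD 0)
          = List.replicate (n+1) a := by simp
      have htails : (List.replicate (n+1) (a :: t)).map List.tail
          = List.replicate (n+1) t := by simp
      rw [hheads, htails, ih (n+1)]
      simp

-- ===== VERDICT (by name: the statement is the Claim_ definition above) =====

theorem generate_batch_by_neg_rate_spec : Claim_equal_generate_batch_by_neg_rate := by
  intro batch rate _
  unfold Spec_generate_batch_by_neg_rate generate_batch_by_neg_rate generate_batch_by_neg_rate_alt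
  set r := PySem.List.pyRange 0 rate 1 with hr
  have hbuild : r.foldl (fun acc _ => acc ++ [batch]) []
      = List.replicate r.length batch := by
    have h := PySem.List.foldl_append_singleton_eq_map (l := r) (acc := ([] : List (List Int)))
      (f := fun _ => batch)
    simpa [List.map_const'] using h
  show (pyZip (r.foldl (fun acc _ => acc ++ [batch]) [])).foldl (fun results x => results ++ x) [] = _
  rw [hbuild, pyZip_replicate batch r.length]
  by_cases hk : r.length = 0
  · have : r = [] := List.eq_nil_of_length_eq_zero hk
    simp [this]
  · rw [if_neg hk]
    rw [List.foldl_map,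
      PySem.List.foldl_append_eq_flatMap (fun a => List.replicate r.length a) batch []]
    simp [List.map_const']
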